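-- pv_equiv track=rewrite | github.com/WatermeloneXT/IO-Benchmark | commands/analyze_model_wrong_keywords.py | ngram_candidates
-- ===== SOURCE A (Python) =====
-- from typing import Any, Dict, Iterable, List, Optional, Sequence, Set, Tuple
--
-- PHRASE_ALIASES: Dict[str, str] = {
--     "discount": "discount factor",
--     "elasticity epsilon": "epsilon elasticity",
--     "factor": "discount factor",
--     "payments lump": "lump sum",
--     "payments lump sum": "lump sum",
--     "quality high": "high quality",
--     "quality low": "low quality",
--     "rate interest": "interest rate",
--     "side payments lump": "side payments",
-- }
--
-- def normalize_candidate_keyword(candidate: str) -> str: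
--     return PHRASE_ALIASES.get(candidate, candidate)
--
-- def ngram_candidates(
--     tokens: Sequence[Optional[str]],
--     ngram_min: int,
--     ngram_max: int,
--     candidate_stopwords: Set[str],
-- ) -> Set[str]:
--     out: Set[str] = set()
--     n_tokens = len(tokens)
--     for n in range(max(1, ngram_min), max(ngram_min, ngram_max) + 1):
--         if n > n_tokens:
--             continue
--         for idx in range(0, n_tokens - n + 1):
--             span = tokens[idx : idx + n]
--             if any(tok is None for tok in span):
--                 continue
--             gram = tuple(str(tok) for tok in span)
--             if len(set(gram)) < len(gram):
--                 continue
--             candidate = " ".join(gram)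
--             candidate = normalize_candidate_keyword(candidate)
--             if candidate in candidate_stopwords:
--                 continue
--             out.add(candidate)
--     return out
-- ===== SOURCE B (Python) =====
-- PHRASE_ALIASES = {
--     "discount": "discount factor",
--     "elasticity epsilon": "epsilon elasticity",
--     "factor": "discount factor",
--     "payments lump": "lump sum",
--     "payments lump sum": "lump sum",
--     "quality high": "high quality",
--     "quality low": "low quality",
--     "rate interest": "interest rate",
--     "side payments lump": "side payments",
-- }
--
--
-- def normalize_candidate_keyword(candidate):
--     return PHRASE_ALIASES.get(candidate, candidate)
--
--
-- def ngram_candidates(tokens, ngram_min, ngram_max, candidate_stopwords):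
--     toks = list(tokens)
--     n_tokens = len(toks)
--     # run[i] = length of the longest span starting at i with no None token
--     # and no duplicate str(token); a span toks[idx:idx+n] is valid iff n <= run[idx]
--     run = []
--     for i in range(n_tokens):
--         seen = set()
--         j = i
--         while j < n_tokens and toks[j] is not None and str(toks[j]) not in seen:
--             seen.add(str(toks[j]))
--             j += 1
--         run.append(j - i)
--     out = set()
--     for n in range(max(1, ngram_min), max(ngram_min, ngram_max) + 1):
--         for idx in range(0, n_tokens - n + 1):
--             if run[idx] < n:
--                 continue
--             candidate = normalize_candidate_keyword(
--                 " ".join(str(t) for t in toks[idx:idx + n]))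
--             if candidate not in candidate_stopwords:
--                 out.add(candidate)
--     return out
-- ===== Notes on version B (the rewrite author's own statement) =====
-- stated objective: faster
-- what changed: B precomputes, per start index, the length of the longest None-free duplicate-free run (extending a window with a seen-set), so each span's validity becomes a single O(1) table comparison instead of A's per-span None scan plus set(gram) rebuild, and invalid spans skip the join entirely.
import Mathlib
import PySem

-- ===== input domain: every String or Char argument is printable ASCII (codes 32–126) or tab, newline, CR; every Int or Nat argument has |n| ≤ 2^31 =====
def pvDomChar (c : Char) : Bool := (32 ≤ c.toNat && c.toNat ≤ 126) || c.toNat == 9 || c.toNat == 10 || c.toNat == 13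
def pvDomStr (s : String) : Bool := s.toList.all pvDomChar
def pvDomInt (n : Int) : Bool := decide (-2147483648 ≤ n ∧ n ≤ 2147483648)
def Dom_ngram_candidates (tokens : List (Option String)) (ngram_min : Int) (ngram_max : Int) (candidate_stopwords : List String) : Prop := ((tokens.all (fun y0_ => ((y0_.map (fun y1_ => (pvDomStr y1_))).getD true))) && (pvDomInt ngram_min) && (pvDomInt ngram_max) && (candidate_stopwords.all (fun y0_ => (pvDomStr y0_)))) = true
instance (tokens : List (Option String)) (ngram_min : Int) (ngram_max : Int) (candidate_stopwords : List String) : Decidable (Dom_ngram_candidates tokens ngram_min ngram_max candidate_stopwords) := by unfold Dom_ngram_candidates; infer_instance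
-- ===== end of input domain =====

-- B replaces A's per-span None/duplicate scans by a precomputed run-length table
-- (longest valid span from each start), making each span's validity test O(1);
-- the emitted set and its insertion order are unchanged.

-- ===== PORT A =====
-- str(tok) for an Optional[str] token (only 'some' reaches it after A's None check;
-- str(None) = "None" kept for faithfulness)
def pyStrTok : Option String → String
  | some s => s
  | none => "None"

def PHRASE_ALIASES : PySem.Dict String String := PySem.Dict.ofList
  [("discount", "discount factor"),
   ("elasticity epsilon", "epsilon elasticity"),
   ("factor", "discount factor"),
   ("payments lump", "lump sum"),
   ("payments lump sum", "lump sum"),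
   ("quality high", "high quality"),
   ("quality low", "low quality"),
   ("rate interest", "interest rate"),
   ("side payments lump", "side payments")]

def normalize_candidate_keyword (candidate : String) : String :=
  PySem.Dict.getD PHRASE_ALIASES candidate candidate

def ngram_candidates (tokens : List (Option String)) (ngram_min : Int) (ngram_max : Int) (candidate_stopwords : List String) : List String :=
  let n_tokens : Int := tokens.length
  (PySem.List.pyRange (max 1 ngram_min) (max ngram_min ngram_max + 1) 1).foldl
    (fun out n =>
      if n > n_tokens then out
      else
        (PySem.List.pyRange 0 (n_tokens - n + 1) 1).foldl
          (fun out idx =>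
            let span := PySem.List.slice tokens (some idx) (some (idx + n))
            if span.any (fun tok => tok == none) then out
            else
              let gram := span.map pyStrTok
              if (PySem.Set.ofList gram).length < gram.length then out
              else
                let candidate := normalize_candidate_keyword (PySem.Str.join " " gram)
                if candidate ∈ candidate_stopwords then out
                else PySem.Set.add out candidate)
          out)
    []

-- ===== PORT B =====
-- the 'while j < n_tokens and toks[j] is not None and str(toks[j]) not in seen' extension,
-- as structural recursion on the suffix starting at j
def extendLen : List (Option String) → PySem.Set String → Nat
  | [], _ => 0
  | none :: _, _ => 0
  | some s :: rest, seen =>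
      if seen.contains s then 0 else 1 + extendLen rest (seen.add s)

def ngram_candidates_alt (tokens : List (Option String)) (ngram_min : Int) (ngram_max : Int) (candidate_stopwords : List String) : List String :=
  let n_tokens : Int := tokens.length
  let run : List Int :=
    (PySem.List.pyRange 0 n_tokens 1).foldl
      (fun acc i => acc ++ [(extendLen (PySem.List.slice tokens (some i) none) PySem.Set.empty : Int)])
      []
  (PySem.List.pyRange (max 1 ngram_min) (max ngram_min ngram_max + 1) 1).foldl
    (fun out n =>
      (PySem.List.pyRange 0 (n_tokens - n + 1) 1).foldl
        (fun out idx =>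
          if PySem.List.pyGetD run idx 0 < n then out
          else
            let candidate := normalize_candidate_keyword
              (PySem.Str.join " " ((PySem.List.slice tokens (some idx) (some (idx + n))).map pyStrTok))
            if candidate ∈ candidate_stopwords then out
            else PySem.Set.add out candidate)
        out)
    []

-- ===== PRECONDITION & SPEC =====
def Spec_ngram_candidates (tokens : List (Option String)) (ngram_min : Int) (ngram_max : Int) (candidate_stopwords : List String) (out : List String) : Prop := out = ngram_candidates_alt tokens ngram_min ngram_max candidate_stopwords
instance (tokens : List (Option String)) (ngram_min : Int) (ngram_max : Int) (candidate_stopwords : List String) (out : List String) : Decidable (Spec_ngram_candidates tokens ngram_min ngram_max candidate_stopwords out) := by unfold Spec_ngram_candidates; infer_instance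

-- ===== CLAIM (what is proved, stated in full; the proofs are below) =====
def Claim_equal_ngram_candidates : Prop := ∀ (tokens : List (Option String)) (ngram_min : Int) (ngram_max : Int) (candidate_stopwords : List String), Dom_ngram_candidates tokens ngram_min ngram_max candidate_stopwords → Spec_ngram_candidates tokens ngram_min ngram_max candidate_stopwords (ngram_candidates tokens ngram_min ngram_max candidate_stopwords)

-- ===== LEMMAS AND PROOFS =====

-- set(g) has the same size as g exactly when g has no duplicates
theorem ofList_length_eq_iff_nodup (g : List String) :
    (PySem.Set.ofList g).length = g.length ↔ g.Nodup := by
  induction g with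
  | nil => simp [PySem.Set.ofList]
  | cons x xs ih =>
    rw [PySem.Set.ofList_cons]
    simp only [List.length_cons, List.nodup_cons, PySem.Set.discard]
    constructor
    · intro h
      have hle1 : ((PySem.Set.ofList xs).filter (fun y => !y == x)).length ≤ (PySem.Set.ofList xs).length :=
        List.length_filter_le _ _
      have hle2 := PySem.Set.length_ofList_le xs
      have hfl : ((PySem.Set.ofList xs).filter (fun y => !y == x)).length = xs.length := by omega
      have hofl : (PySem.Set.ofList xs).length = xs.length := by omega
      have hnd := ih.mp hofl
      have hall : ∀ a ∈ PySem.Set.ofList xs, (!a == x) = true := by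
        apply List.length_filter_eq_length_iff.mp
        rw [hofl] at hle1 ⊢
        exact hfl
      refine ⟨fun hx => ?_, hnd⟩
      have hx' : x ∈ PySem.Set.ofList xs := by
        rw [PySem.Set.mem_ofList]; exact hx
      have := hall x hx'
      simp at this
    · rintro ⟨hx, hnd⟩
      rw [PySem.Set.ofList_eq_self_of_nodup xs hnd]
      have : xs.filter (fun y => !y == x) = xs := by
        apply List.filter_eq_self.mpr
        intro a ha
        simp only [Bool.not_eq_eq_eq_not, Bool.not_true, beq_eq_false_iff_ne]
        exact fun h => hx (h ▸ ha)
      rw [this]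

-- k ≤ extendLen l seen ↔ the k-prefix of l fits in l, has no None token, its strings are
-- pairwise distinct and all avoid seen
theorem extendLen_iff (l : List (Option String)) (seen : PySem.Set String) (k : Nat) :
    k ≤ extendLen l seen ↔
      k ≤ l.length ∧ (∀ t ∈ l.take k, t ≠ none) ∧ ((l.take k).map pyStrTok).Nodup ∧
        (∀ x ∈ (l.take k).map pyStrTok, x ∉ seen) := by
  induction l generalizing seen k with
  | nil => simp [extendLen]
  | cons hd tl ih =>
    match hd with
    | none =>
      cases k with
      | zero => simp [extendLen]
      | succ k => simp [extendLen]
    | some s =>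
      by_cases hs : s ∈ seen
      · have hc : (PySem.Set.contains seen s) = true := (PySem.Set.contains_iff seen s).mpr hs
        cases k with
        | zero => simp [extendLen]
        | succ k =>
          rw [show extendLen (some s :: tl) seen = 0 from by simp [extendLen]; exact hs]
          simp only [List.take_succ_cons, List.map_cons, List.mem_cons, List.mem_map]
          constructor
          · intro h; omega
          · rintro ⟨-, -, -, h4⟩
            exact absurd hs (h4 s (Or.inl (by simp [pyStrTok])))
      · have hc : (PySem.Set.contains seen s) = false := by
          rw [← Bool.not_eq_true, PySem.Set.contains_iff]; exact hs
        cases k with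
        | zero => simp [extendLen]
        | succ k =>
          rw [show extendLen (some s :: tl) seen = 1 + extendLen tl (seen.add s) from by
            simp [extendLen]; intro h; exact absurd h hs]
          rw [show (k + 1 ≤ 1 + extendLen tl (seen.add s)) ↔ (k ≤ extendLen tl (seen.add s)) from by
            omega]
          rw [ih]
          simp only [List.take_succ_cons, List.length_cons, List.map_cons, List.nodup_cons,
            List.mem_cons, List.mem_map, PySem.Set.mem_add, pyStrTok]
          constructor
          · rintro ⟨h1, h2, h3, h4⟩
            refine ⟨by omega, ?_, ⟨?_, h3⟩, ?_⟩
            · rintro t (rfl | ht)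
              · simp
              · exact h2 t ht
            · rintro ⟨a, ha, hae⟩
              exact (h4 (pyStrTok a) ⟨a, ha, rfl⟩) (Or.inr hae)
            · rintro x (rfl | ⟨a, ha, rfl⟩)
              · exact hs
              · intro hmem
                exact (h4 (pyStrTok a) ⟨a, ha, rfl⟩) (Or.inl hmem)
          · rintro ⟨h1, h2, h3, h4⟩
            refine ⟨by omega, ?_, h3.2, ?_⟩
            · intro t ht; exact h2 t (Or.inr ht)
            · rintro x ⟨a, ha, rfl⟩ (hmem | rfl)
              · exact (h4 (pyStrTok a) (Or.inr ⟨a, ha, rfl⟩)) hmem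
              · exact h3.1 ⟨a, ha, rfl⟩

-- A and B produce the same list: the loops are aligned ngram-length by ngram-length and
-- start index by start index; a span passes A's None/duplicate scans iff its length is
-- at most B's precomputed run length for its start index
theorem main_eq (tokens : List (Option String)) (mn mx : Int) (stop : List String) :
    ngram_candidates tokens mn mx stop = ngram_candidates_alt tokens mn mx stop := by
  unfold ngram_candidates ngram_candidates_alt
  dsimp only
  apply PySem.List.foldl_congr_mem
  intro out n hn
  have hn' := PySem.List.mem_pyRange_one.mp hn
  have h1 : (1:Int) ≤ n := le_trans (le_max_left 1 mn) hn'.1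
  by_cases hbig : n > (tokens.length : Int)
  · rw [if_pos hbig, PySem.List.pyRange_one_eq_nil (by omega : (tokens.length:Int) - n + 1 ≤ 0)]
    simp
  · rw [if_neg hbig]
    rw [not_lt] at hbig
    apply PySem.List.foldl_congr_mem
    intro out' idx hidx
    have hidx' := PySem.List.mem_pyRange_one.mp hidx
    rw [PySem.List.foldl_append_singleton_eq_map, List.nil_append,
      PySem.List.pyGetD_map_pyRange_of_nonneg _ _ _ _ hidx'.1 (by omega),
      PySem.List.slice_from tokens hidx'.1,
      PySem.List.slice_toNat tokens hidx'.1 (by omega : (0:Int) ≤ idx + n),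
      show (idx + n).toNat - idx.toNat = n.toNat from by omega]
    have hklen : n.toNat ≤ (tokens.drop idx.toNat).length := by
      rw [List.length_drop]; omega
    have key := extendLen_iff (tokens.drop idx.toNat) PySem.Set.empty n.toNat
    by_cases hB : (extendLen (tokens.drop idx.toNat) PySem.Set.empty : Int) < n
    · rw [if_pos hB]
      have hnot : ¬ (n.toNat ≤ extendLen (tokens.drop idx.toNat) PySem.Set.empty) := by omega
      rw [key] at hnot
      by_cases hA1 : ((tokens.drop idx.toNat).take n.toNat).any (fun tok => tok == none) = true
      · rw [if_pos hA1]
      · rw [if_neg hA1]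
        have hnone : ∀ t ∈ (tokens.drop idx.toNat).take n.toNat, t ≠ none := by
          intro t ht hcon
          exact hA1 (List.any_eq_true.mpr ⟨t, ht, by simp [hcon]⟩)
        have hnodup : ¬ (((tokens.drop idx.toNat).take n.toNat).map pyStrTok).Nodup := by
          intro hnd
          exact hnot ⟨hklen, hnone, hnd, fun x hx => by simp [PySem.Set.empty]⟩
        rw [if_pos (by
          have hle := PySem.Set.length_ofList_le (((tokens.drop idx.toNat).take n.toNat).map pyStrTok)
          have hne : (PySem.Set.ofList (((tokens.drop idx.toNat).take n.toNat).map pyStrTok)).length ≠ (((tokens.drop idx.toNat).take n.toNat).map pyStrTok).length := by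
            intro he
            exact hnodup ((ofList_length_eq_iff_nodup _).mp he)
          omega)]
    · rw [if_neg hB]
      have hyes : n.toNat ≤ extendLen (tokens.drop idx.toNat) PySem.Set.empty := by omega
      rw [key] at hyes
      obtain ⟨-, hnone, hnodup, -⟩ := hyes
      rw [if_neg (by
        simp only [List.any_eq_true, not_exists, not_and]
        intro t ht
        simp [hnone t ht])]
      rw [if_neg (by
        rw [(ofList_length_eq_iff_nodup _).mpr hnodup]
        omega)]

-- ===== VERDICT (by name: the statement is the Claim_ definition above) =====
theorem ngram_candidates_spec : Claim_equal_ngram_candidates := by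
  intro tokens ngram_min ngram_max candidate_stopwords _
  unfold Spec_ngram_candidates
  exact main_eq tokens ngram_min ngram_max candidate_stopwords
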